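-- pv_equiv track=rewrite | github.com/sat2050/redis-completion | redis_completion/engine.py | score_key
-- ===== SOURCE A (Python) =====
-- def score_key(k, max_size=20):
--     k_len = len(k)
--     a = ord('a') - 2
--     score = 0
--
--     for i in range(max_size):
--         if i < k_len:
--             c = (ord(k[i]) - a)
--             if c < 2 or c > 27:
--                 c = 1
--         else:
--             c = 1
--         score += c*(27**(max_size-i))
--     return score
-- ===== SOURCE B (Python) =====
-- def score_key(k, max_size=20):
--     # Horner over the real characters only, then close the all-padding tail
--     # with a geometric-series formula instead of looping over it.
--     ms = max(0, max_size)
--     m = min(len(k), ms)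
--     a = ord('a') - 2
--     h = 0
--     for ch in k[:m]:
--         c = ord(ch) - a
--         h = h * 27 + (c if 2 <= c <= 27 else 1)
--     t = ms - m
--     return h * 27 ** (t + 1) + (27 ** (t + 1) - 27) // 26
-- ===== Notes on version B (the rewrite author's own statement) =====
-- stated objective: faster
-- what changed: Replaces A's loop over all max_size positions, each computing a fresh bignum power 27**(max_size-i), with a Horner accumulation over only the string's first min(len(k),max_size) characters plus a closed-form geometric-series term for the padding tail.
import Mathlib
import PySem

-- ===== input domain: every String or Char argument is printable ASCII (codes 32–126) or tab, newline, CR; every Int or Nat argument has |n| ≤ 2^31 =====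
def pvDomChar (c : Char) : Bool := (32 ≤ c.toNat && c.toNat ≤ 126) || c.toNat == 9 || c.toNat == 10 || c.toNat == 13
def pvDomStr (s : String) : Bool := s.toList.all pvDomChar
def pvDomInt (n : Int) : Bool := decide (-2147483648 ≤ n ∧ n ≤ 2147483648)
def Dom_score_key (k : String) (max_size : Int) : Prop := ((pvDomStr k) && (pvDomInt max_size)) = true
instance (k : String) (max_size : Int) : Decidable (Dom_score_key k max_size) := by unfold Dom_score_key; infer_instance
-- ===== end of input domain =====

-- B replaces A's per-position power sum with a Horner loop over the real characters
-- followed by a closed-form geometric series for the padding tail (objective: faster; avoids a fresh bignum power per position).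

-- ===== PORT A =====
def score_key (k : String) (max_size : Int) : Int :=
  let k_len : Int := PySem.Str.len k
  let a : Int := ('a'.toNat : Int) - 2
  (PySem.List.pyRange 0 max_size 1).foldl
    (fun score i =>
      let c : Int :=
        if i < k_len then
          -- ord(k[i]); here 0 ≤ i < k_len so pyGet? is some (the getD default is unreachable)
          let c : Int := (((PySem.Str.pyGet? k i).map (fun ch => (ch.toNat : Int))).getD 0) - a
          if c < 2 ∨ 27 < c then 1 else c
        else 1
      -- 27**(max_size - i); inside the loop max_size - i ≥ 1, so toNat is exact
      score + c * 27 ^ (max_size - i).toNat) 0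

-- ===== PORT B =====
def score_key_alt (k : String) (max_size : Int) : Int :=
  let ms : Int := max 0 max_size
  let m : Int := min (PySem.Str.len k) ms
  let a : Int := ('a'.toNat : Int) - 2
  -- k[:m] with 0 ≤ m ≤ len(k) is exactly take m
  let h : Int := (k.toList.take m.toNat).foldl
      (fun h ch =>
        let c : Int := (ch.toNat : Int) - a
        h * 27 + (if 2 ≤ c ∧ c ≤ 27 then c else 1)) 0
  let t : Int := ms - m
  -- t ≥ 0, so the Python exponent t+1 is the Nat (t+1).toNat
  h * 27 ^ (t + 1).toNat + PySem.Int.floordiv (27 ^ (t + 1).toNat - 27) 26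

-- ===== PRECONDITION & SPEC =====
def Spec_score_key (k : String) (max_size : Int) (out : Int) : Prop := out = score_key_alt k max_size
instance (k : String) (max_size : Int) (out : Int) : Decidable (Spec_score_key k max_size out) := by unfold Spec_score_key; infer_instance

-- ===== CLAIM (what is proved, stated in full; the proofs are below) =====
def Claim_equal_score_key : Prop := ∀ (k : String) (max_size : Int), Dom_score_key k max_size → Spec_score_key k max_size (score_key k max_size)

-- ===== LEMMAS AND PROOFS =====

/-- The per-index coefficient of A's sum: clamped char value, 1 past the end. -/
def pvC (L : List Char) (i : Nat) : Int :=
  match L[i]? with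
  | some ch =>
      let c : Int := (ch.toNat : Int) - 95
      if c < 2 ∨ 27 < c then 1 else c
  | none => 1

/-- Reference recurrence both ports are reduced to. -/
def pvR (L : List Char) : Nat → Int
  | 0 => 0
  | n+1 => 27 * pvR L n + 27 * pvC L n

/-- B's Horner accumulator. -/
def pvH (L : List Char) : Int :=
  L.foldl (fun h ch =>
    let c : Int := (ch.toNat : Int) - 95
    h * 27 + (if 2 ≤ c ∧ c ≤ 27 then c else 1)) 0

/-- The padding tail as a recurrence. -/
def pvG : Nat → Int
  | 0 => 0
  | t+1 => 27 * pvG t + 27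

theorem pv_sumA (L : List Char) (n e : Nat) :
    ((List.range n).map (fun j => pvC L j * 27 ^ (e + (n - j)))).sum = 27 ^ e * pvR L n := by
  induction n generalizing e with
  | zero => simp [pvR]
  | succ n ih =>
      rw [List.range_succ, List.map_append, List.sum_append]
      have hcong : (List.range n).map (fun j => pvC L j * 27 ^ (e + (n + 1 - j)))
          = (List.range n).map (fun j => 27 * (pvC L j * 27 ^ (e + (n - j)))) := by
        apply List.map_congr_left
        intro j hj
        have hj' : j < n := List.mem_range.mp hj
        have : e + (n + 1 - j) = (e + (n - j)) + 1 := by omega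
        rw [this, pow_succ]; ring
      rw [hcong, List.sum_map_mul_left, ih e]
      simp only [List.map_cons, List.map_nil, List.sum_cons, List.sum_nil, pvR]
      have : e + (n + 1 - n) = e + 1 := by omega
      rw [this, pow_succ]
      ring

theorem pv_sum_eq (L : List Char) (n : Nat) (g : Int → Int)
    (h : ∀ j : Nat, j < n → g (j : Int) = pvC L j * 27 ^ (n - j)) :
    (0 : Int) + ((PySem.List.pyRange 0 (n : Int) 1).map g).sum = pvR L n := by
  rw [PySem.List.pyRange_one]
  simp only [Int.sub_zero, Int.toNat_natCast, List.map_map, zero_add]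
  have hcong : ∀ j ∈ List.range n,
      (g ∘ fun (j : Nat) => ((j : Int))) j = pvC L j * 27 ^ (0 + (n - j)) := by
    intro j hj
    simp only [Function.comp]
    rw [show (0 : Nat) + (n - j) = n - j from by omega]
    exact h j (List.mem_range.mp hj)
  rw [List.map_congr_left hcong, pv_sumA]
  simp

theorem pv_portA (k : String) (n : Nat) : score_key k (n : Int) = pvR k.toList n := by
  unfold score_key
  rw [PySem.List.foldl_add]
  refine pv_sum_eq k.toList n _ ?_
  intro j hj
  simp only
  have hexp : (((n : Int)) - (j : Int)).toNat = n - j := by omega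
  rw [hexp]
  congr 1
  rw [PySem.Str.len_eq]
  by_cases hlt : (j : Int) < (k.toList.length : Int)
  · have hjl : j < k.toList.length := by exact_mod_cast hlt
    rw [if_pos hlt]
    simp only [PySem.Str.pyGet?_natCast]
    rw [List.getElem?_eq_getElem hjl]
    simp [pvC, List.getElem?_eq_getElem hjl]
  · have hjl : k.toList.length ≤ j := by omega
    have hnone : k.toList[j]? = none := List.getElem?_eq_none hjl
    rw [if_neg hlt]
    rw [pvC, hnone]

theorem pvH_take_succ (L : List Char) (m : Nat) (h : m < L.length) :
    pvH (L.take (m + 1)) = 27 * pvH (L.take m) +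
      (let c : Int := ((L[m].toNat : Int)) - 95; if 2 ≤ c ∧ c ≤ 27 then c else 1) := by
  rw [List.take_add_one, List.getElem?_eq_getElem h]
  unfold pvH
  rw [List.foldl_append]
  simp only [Option.toList, List.foldl_cons, List.foldl_nil]
  ring

theorem pv_R_le (L : List Char) (n : Nat) (h : n ≤ L.length) :
    pvR L n = 27 * pvH (L.take n) := by
  induction n with
  | zero => simp [pvR, pvH]
  | succ n ih =>
      have hn : n < L.length := by omega
      rw [pvR, ih (by omega), pvH_take_succ L n hn]
      have hc : pvC L n = (let c : Int := ((L[n].toNat : Int)) - 95; if 2 ≤ c ∧ c ≤ 27 then c else 1) := by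
        simp only [pvC, List.getElem?_eq_getElem hn]
        split_ifs with h1 h2 <;> omega
      rw [hc]; ring

theorem pv_R_ge (L : List Char) (t : Nat) :
    pvR L (L.length + t) = 27 * pvH L * 27 ^ t + pvG t := by
  induction t with
  | zero =>
      have := pv_R_le L L.length (le_refl _)
      simpa [pvG] using this
  | succ t ih =>
      have hC : pvC L (L.length + t) = 1 := by
        have hnone : L[L.length + t]? = none := List.getElem?_eq_none (by omega)
        rw [pvC, hnone]
      show pvR L ((L.length + t) + 1) = _
      rw [pvR, ih, hC, pvG, pow_succ]
      ring

theorem pv_geom (t : Nat) : (27 : Int) ^ (t + 1) - 27 = 26 * pvG t := by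
  induction t with
  | zero => simp [pvG]
  | succ t ih =>
      rw [pvG]
      have : (27 : Int) ^ (t + 1 + 1) = 27 * 27 ^ (t + 1) := by rw [pow_succ]; ring
      rw [this]
      linarith

theorem pv_portB (k : String) (ms : Int) :
    score_key_alt k ms = 27 * pvH (k.toList.take (min k.toList.length (max 0 ms).toNat))
        * 27 ^ ((max 0 ms).toNat - min k.toList.length (max 0 ms).toNat)
      + pvG ((max 0 ms).toNat - min k.toList.length (max 0 ms).toNat) := by
  simp only [score_key_alt, PySem.Str.len_eq]
  set l : Nat := k.toList.length with hl
  set n : Nat := (max 0 ms).toNat with hn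
  have h1 : min (l : Int) (max 0 ms) = ((min l n : Nat) : Int) := by omega
  have h2 : (min (l : Int) (max 0 ms)).toNat = min l n := by omega
  set t : Nat := n - min l n with ht
  have h3 : (max 0 ms - min (l : Int) (max 0 ms) + 1).toNat = t + 1 := by omega
  rw [h2, h3]
  have hH : (k.toList.take (min l n)).foldl
      (fun h ch => h * 27 + (let c : Int := (ch.toNat : Int) - (('a'.toNat : Int) - 2);
        if 2 ≤ c ∧ c ≤ 27 then c else 1)) 0 = pvH (k.toList.take (min l n)) := by
    unfold pvH
    congr 1
  have hG : PySem.Int.floordiv ((27 : Int) ^ (t + 1) - 27) 26 = pvG t := by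
    rw [pv_geom t, PySem.Int.floordiv_eq_ediv_of_pos (by norm_num), Int.mul_ediv_cancel_left _ (by norm_num)]
  rw [hH, hG, pow_succ]
  ring

-- ===== VERDICT (by name: the statement is the Claim_ definition above) =====
theorem score_key_spec : Claim_equal_score_key := by
  intro k ms _
  unfold Spec_score_key
  by_cases hms : ms < 0
  · have hA : score_key k ms = 0 := by
      unfold score_key
      rw [PySem.List.pyRange_one_eq_nil (by omega)]
      simp
    have hB := pv_portB k ms
    have hn : (max 0 ms).toNat = 0 := by omega
    rw [hB, hn]
    simp [pvG, pvH, hA]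
  · rw [Int.not_lt] at hms
    obtain ⟨n, hn⟩ : ∃ n : Nat, ms = (n : Int) := ⟨ms.toNat, by omega⟩
    subst hn
    rw [pv_portA k n, pv_portB k (n : Int)]
    have hmax : (max 0 (n : Int)).toNat = n := by omega
    rw [hmax]
    by_cases hle : n ≤ k.toList.length
    · have hmin : min k.toList.length n = n := by omega
      rw [hmin]
      have ht : n - n = 0 := by omega
      rw [ht]
      simp [pvG, pv_R_le k.toList n hle]
    · have hmin : min k.toList.length n = k.toList.length := by omega
      rw [hmin]
      set t : Nat := n - k.toList.length with htdef
      have hnt : n = k.toList.length + t := by omega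
      rw [hnt, pv_R_ge k.toList t, List.take_length]
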